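-- pv_equiv track=rewrite | github.com/timhebert1963/stock-quoter | functions_stock_quote_tracker.py | pad_with_spaces_dots
-- ===== SOURCE A (Python) =====
-- def pad_with_spaces_dots(var, length, space_or_dot):
--
--
--     # colorama seems to add 13 to the length of a variable.
--     # var = the colorama encoded var
--     # length = original length of var before colorama encoding
--     #
--     # pad var with len_var number of spaces or dots
--     if space_or_dot == 'company':
--
--         for i in range(length):
--             if i == 0:
--                 var = var + ' '
--             else:
--                 var = var + '.'
--
--     elif space_or_dot == 'dot':
--
--         for i in range(length+1):
--             if i == 0:
--                 var = var + ' '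
--             elif i != length:
--                 var = var + '.'
--             else:
--                 var = var + ' '
--
--     elif space_or_dot == 'title' or space_or_dot == 'space_+_one':
--
--         for i in range(length+1):
--             var = var + ' '
--
--     elif space_or_dot == 'space':
--
--         for i in range(length):
--             var = var + ' '
--
--     return var
-- ===== SOURCE B (Python) =====
-- def pad_with_spaces_dots(var, length, space_or_dot):
--     # B: same mode dispatch, but each branch's char-by-char loop replaced by a
--     # closed-form padding string built with multiplication; no loops.
--     if space_or_dot == 'company':
--         pad = '' if length <= 0 else ' ' + '.' * (length - 1)
--     elif space_or_dot == 'dot':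
--         if length < 0:
--             pad = ''
--         elif length == 0:
--             pad = ' '
--         else:
--             pad = ' ' + '.' * (length - 1) + ' '
--     elif space_or_dot == 'title' or space_or_dot == 'space_+_one':
--         pad = ' ' * (length + 1)
--     elif space_or_dot == 'space':
--         pad = ' ' * length
--     else:
--         pad = ''
--     return var + pad
-- ===== Notes on version B (the rewrite author's own statement) =====
-- stated objective: idiomatic
-- what changed: Replaced every branch's character-by-character accumulation loop with a single closed-form padding string built by string multiplication, guarded exactly for zero/negative lengths.
import Mathlib
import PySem

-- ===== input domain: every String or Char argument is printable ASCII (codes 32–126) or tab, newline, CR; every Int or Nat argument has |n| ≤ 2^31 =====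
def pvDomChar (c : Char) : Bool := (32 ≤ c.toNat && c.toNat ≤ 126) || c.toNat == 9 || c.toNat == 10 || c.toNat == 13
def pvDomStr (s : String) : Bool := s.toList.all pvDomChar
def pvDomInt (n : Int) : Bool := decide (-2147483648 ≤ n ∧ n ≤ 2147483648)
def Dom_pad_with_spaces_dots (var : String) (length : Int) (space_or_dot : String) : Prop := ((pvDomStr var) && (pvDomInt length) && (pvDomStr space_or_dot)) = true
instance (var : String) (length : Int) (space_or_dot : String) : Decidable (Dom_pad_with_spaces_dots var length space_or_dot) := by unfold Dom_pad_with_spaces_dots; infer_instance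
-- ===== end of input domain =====

-- B changes A's per-character padding loops into closed-form repeated-character strings (idiomatic; same behaviour).

-- ===== PORT A =====
-- literal port: each Python for-loop over range(...) is a foldl over PySem.List.pyRange,
-- string concatenation done on the List Char side (Lean's String.append is kernel-opaque).
def pad_with_spaces_dots (var : String) (length : Int) (space_or_dot : String) : String :=
  if space_or_dot == "company" then
    String.ofList ((PySem.List.pyRange 0 length 1).foldl
      (fun v i => if i == 0 then v ++ [' '] else v ++ ['.']) var.toList)
  else if space_or_dot == "dot" then
    String.ofList ((PySem.List.pyRange 0 (length + 1) 1).foldl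
      (fun v i => if i == 0 then v ++ [' '] else if i != length then v ++ ['.'] else v ++ [' ']) var.toList)
  else if space_or_dot == "title" || space_or_dot == "space_+_one" then
    String.ofList ((PySem.List.pyRange 0 (length + 1) 1).foldl
      (fun v _ => v ++ [' ']) var.toList)
  else if space_or_dot == "space" then
    String.ofList ((PySem.List.pyRange 0 length 1).foldl
      (fun v _ => v ++ [' ']) var.toList)
  else var

-- ===== PORT B =====
-- ' ' + '.'*(n) + ' ' style closed forms; '*' is List.replicate (Python repeat yields '' for n ≤ 0).
def pad_with_spaces_dots_alt (var : String) (length : Int) (space_or_dot : String) : String :=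
  let pad : List Char :=
    if space_or_dot == "company" then
      if length ≤ 0 then [] else ' ' :: List.replicate (length - 1).toNat '.'
    else if space_or_dot == "dot" then
      if length < 0 then []
      else if length == 0 then [' ']
      else ' ' :: (List.replicate (length - 1).toNat '.' ++ [' '])
    else if space_or_dot == "title" || space_or_dot == "space_+_one" then
      List.replicate (length + 1).toNat ' '
    else if space_or_dot == "space" then
      List.replicate length.toNat ' '
    else []
  String.ofList (var.toList ++ pad)

-- ===== PRECONDITION & SPEC =====
def Spec_pad_with_spaces_dots (var : String) (length : Int) (space_or_dot : String) (out : String) : Prop := out = pad_with_spaces_dots_alt var length space_or_dot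
instance (var : String) (length : Int) (space_or_dot : String) (out : String) : Decidable (Spec_pad_with_spaces_dots var length space_or_dot out) := by unfold Spec_pad_with_spaces_dots; infer_instance

-- ===== CLAIM (what is proved, stated in full; the proofs are below) =====
def Claim_equal_pad_with_spaces_dots : Prop := ∀ (var : String) (length : Int) (space_or_dot : String), Dom_pad_with_spaces_dots var length space_or_dot → Spec_pad_with_spaces_dots var length space_or_dot (pad_with_spaces_dots var length space_or_dot)

-- ===== LEMMAS AND PROOFS =====

-- the plain space-appending loop appends m spaces
theorem pv_space_fold (m : Nat) (c : Char) (v : List Char) :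
    (PySem.List.pyRange 0 (m : Int) 1).foldl (fun v _ => v ++ [c]) v = v ++ List.replicate m c := by
  induction m generalizing v with
  | zero => simp [PySem.List.pyRange_one_eq_nil]
  | succ k ih =>
      have h : PySem.List.pyRange 0 ((k : Int) + 1) 1
          = PySem.List.pyRange 0 (k : Int) 1 ++ [(k : Int)] :=
        PySem.List.pyRange_one_succ_right (by positivity)
      have hc : ((k + 1 : Nat) : Int) = (k : Int) + 1 := by push_cast; ring
      rw [hc, h, List.foldl_append, ih, List.replicate_succ']
      simp

-- the company loop appends ' ' then m-1 dots (m ≥ 1)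
theorem pv_company_fold (m : Nat) (v : List Char) :
    (PySem.List.pyRange 0 ((m : Int) + 1) 1).foldl
      (fun v i => if i == 0 then v ++ [' '] else v ++ ['.']) v
    = v ++ (' ' :: List.replicate m '.') := by
  induction m generalizing v with
  | zero => simp [PySem.List.pyRange_one_cons (by norm_num : (0:Int) < 1),
      PySem.List.pyRange_one_eq_nil]
  | succ k ih =>
      have h : PySem.List.pyRange 0 ((k : Int) + 1 + 1) 1
          = PySem.List.pyRange 0 ((k : Int) + 1) 1 ++ [(k : Int) + 1] :=
        PySem.List.pyRange_one_succ_right (by positivity)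
      have hc : (((k + 1 : Nat) : Int) + 1) = ((k : Int) + 1 + 1) := by push_cast; ring
      rw [hc, h, List.foldl_append, ih]
      have hk : ¬((k : Int) + 1 = 0) := by omega
      simp [hk, List.replicate_succ']

-- the dot loop's body equals the company body on indices below length
theorem pv_dot_prefix (n : Int) (m : Nat) (hm : (m : Int) ≤ n) (v : List Char) :
    (PySem.List.pyRange 0 (m : Int) 1).foldl
      (fun v i => if i == 0 then v ++ [' '] else if i != n then v ++ ['.'] else v ++ [' ']) v
    = (PySem.List.pyRange 0 (m : Int) 1).foldl
      (fun v i => if i == 0 then v ++ [' '] else v ++ ['.']) v := by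
  refine PySem.List.foldl_congr_mem _ _ _ _ (fun acc x hx => ?_)
  have := (PySem.List.mem_pyRange_one).mp hx
  have hxn : (x != n) = true := by simp; omega
  by_cases h0 : x = 0 <;> simp [h0, hxn]

theorem pad_equal (var : String) (length : Int) (space_or_dot : String) :
    pad_with_spaces_dots var length space_or_dot
      = pad_with_spaces_dots_alt var length space_or_dot := by
  unfold pad_with_spaces_dots pad_with_spaces_dots_alt
  by_cases h1 : space_or_dot == "company"
  · simp only [h1, if_pos]
    rcases (by omega : length ≤ 0 ∨ 0 < length) with hle | hpos
    · simp [PySem.List.pyRange_one_eq_nil hle, hle]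
    · obtain ⟨m, hm⟩ : ∃ m : Nat, length = (m : Int) + 1 :=
        ⟨(length - 1).toNat, by omega⟩
      rw [hm, pv_company_fold]
      simp [show ¬((m : Int) + 1 ≤ 0) by omega]
  · by_cases h2 : space_or_dot == "dot"
    · simp only [h1, h2, Bool.false_eq_true, if_false, if_pos]
      rcases (by omega : length < 0 ∨ 0 ≤ length) with hneg | hge
      · have : length + 1 ≤ 0 := by omega
        simp [PySem.List.pyRange_one_eq_nil this, hneg]
      · obtain ⟨m, hm⟩ : ∃ m : Nat, length = (m : Int) := ⟨length.toNat, by omega⟩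
        subst hm
        have hsplit : PySem.List.pyRange 0 ((m : Int) + 1) 1
            = PySem.List.pyRange 0 (m : Int) 1 ++ [(m : Int)] :=
          PySem.List.pyRange_one_succ_right (by positivity)
        rw [hsplit, List.foldl_append, pv_dot_prefix (m : Int) m le_rfl]
        cases m with
        | zero => simp [PySem.List.pyRange_one_eq_nil]
        | succ k =>
            rw [show ((k + 1 : Nat) : Int) = (k : Int) + 1 by push_cast; ring,
              pv_company_fold]
            simp [show ¬((k : Int) + 1 < 0) by omega,
              show ¬((k : Int) + 1 = 0) by omega]
    · by_cases h3 : space_or_dot == "title" || space_or_dot == "space_+_one"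
      · simp only [h1, h2, h3, Bool.false_eq_true, if_false, if_pos]
        rcases (by omega : length < 0 ∨ 0 ≤ length) with hneg | hge
        · have h0 : length + 1 ≤ 0 := by omega
          have : (length + 1).toNat = 0 := by omega
          simp [PySem.List.pyRange_one_eq_nil h0, this]
        · obtain ⟨m, hm⟩ : ∃ m : Nat, length + 1 = (m : Int) := ⟨(length + 1).toNat, by omega⟩
          rw [hm, pv_space_fold]
          simp
      · by_cases h4 : space_or_dot == "space"
        · simp only [h1, h2, h3, h4, Bool.false_eq_true, if_false, if_pos]
          rcases (by omega : length < 0 ∨ 0 ≤ length) with hneg | hge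
          · have : length.toNat = 0 := by omega
            simp [PySem.List.pyRange_one_eq_nil (by omega : length ≤ 0), this]
          · obtain ⟨m, hm⟩ : ∃ m : Nat, length = (m : Int) := ⟨length.toNat, by omega⟩
            subst hm
            rw [pv_space_fold]
            simp
        · simp [h1, h2, h3, h4, String.ofList_toList]

-- ===== VERDICT (by name: the statement is the Claim_ definition above) =====
theorem pad_with_spaces_dots_spec : Claim_equal_pad_with_spaces_dots := by
  intro var length space_or_dot _
  exact pad_equal var length space_or_dot
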